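-- pv_equiv track=rewrite | github.com/Haroong/Algorithm | BaekJoon Online Judge/Silver/1065-한수.py | is_equal_diff
-- ===== SOURCE A (Python) =====
-- def is_equal_diff(number):
--     digits =  [int(n) for n in str(number)]
--
--     if len(digits) > 2: # 세자리수부터 판별
--         diff = digits[1] - digits[0]
--
--         for i in range(2, len(digits)):
--             if digits[i] - digits[i-1] != diff:
--                 return False
--
--     return True
-- ===== SOURCE B (Python) =====
-- def is_equal_diff(number):
--     digits = [int(n) for n in str(number)]
--     if len(digits) < 3:
--         return True
--     step = digits[1] - digits[0]
--     expected = [digits[0] + k * step for k in range(len(digits))]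
--     return digits == expected
-- ===== Notes on version B (the rewrite author's own statement) =====
-- stated objective: alternative
-- what changed: Instead of scanning consecutive differences against a running diff, B extrapolates the whole arithmetic sequence in closed form from the first two digits (digits[0] + k*step) and compares that generated list to the digits list for equality.
-- outside the precondition, e.g. on is_equal_diff(-25): A raises ValueError, B raises ValueError
import Mathlib
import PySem

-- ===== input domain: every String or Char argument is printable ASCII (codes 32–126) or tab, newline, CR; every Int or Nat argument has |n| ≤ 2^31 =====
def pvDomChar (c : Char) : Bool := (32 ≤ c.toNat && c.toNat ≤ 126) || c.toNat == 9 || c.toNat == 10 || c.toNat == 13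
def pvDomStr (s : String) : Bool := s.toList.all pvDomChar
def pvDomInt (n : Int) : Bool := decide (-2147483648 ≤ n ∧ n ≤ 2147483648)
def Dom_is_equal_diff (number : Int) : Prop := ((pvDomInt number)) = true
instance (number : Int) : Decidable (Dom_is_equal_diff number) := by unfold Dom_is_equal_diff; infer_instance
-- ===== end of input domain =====

-- B replaces A's scan of consecutive differences by generating the expected arithmetic
-- sequence in closed form from the first two digits and comparing lists (objective: alternative).

-- ===== PORT A =====
-- digits = [int(n) for n in str(number)]; int(c) = c.toNat - 48 is exact for digit
-- characters; Pre_ restricts to number ≥ 0, where str(number) consists of digits only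
-- (on negative numbers Python's int('-') raises ValueError).
def pvDigits (number : Int) : List Int :=
  (PySem.Int.toChars number).map (fun c => ((c.toNat : Int) - 48))

def is_equal_diff (number : Int) : Bool :=
  let digits := pvDigits number
  if (digits.length : Int) > 2 then
    let diff := PySem.List.pyGetD digits 1 0 - PySem.List.pyGetD digits 0 0
    (PySem.List.pyRange 2 (digits.length : Int) 1).foldl
      (fun ok i =>
        if PySem.List.pyGetD digits i 0 - PySem.List.pyGetD digits (i - 1) 0 ≠ diff then false
        else ok) true
  else true

-- ===== PORT B =====
def is_equal_diff_alt (number : Int) : Bool :=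
  let digits := pvDigits number
  if (digits.length : Int) < 3 then true
  else
    let step := PySem.List.pyGetD digits 1 0 - PySem.List.pyGetD digits 0 0
    let expected := (PySem.List.pyRange 0 (digits.length : Int) 1).map
      (fun k => PySem.List.pyGetD digits 0 0 + k * step)
    digits == expected

-- ===== PRECONDITION & SPEC =====
-- Pre_ excludes negative numbers: there str(number) starts with '-' and A raises
-- ValueError in int('-'), returning nothing.
def Pre_is_equal_diff (number : Int) : Prop := 0 ≤ number
instance (number : Int) : Decidable (Pre_is_equal_diff number) := by
  unfold Pre_is_equal_diff; infer_instance

def pvWitness_is_equal_diff : Int := (135)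

def Spec_is_equal_diff (number : Int) (out : Bool) : Prop := out = is_equal_diff_alt number
instance (number : Int) (out : Bool) : Decidable (Spec_is_equal_diff number out) := by
  unfold Spec_is_equal_diff; infer_instance

-- ===== CLAIM (what is proved, stated in full; the proofs are below) =====
def Claim_equal_is_equal_diff : Prop := ∀ (number : Int), Dom_is_equal_diff number → Pre_is_equal_diff number → Spec_is_equal_diff number (is_equal_diff number)

-- ===== LEMMAS AND PROOFS =====

-- from equal consecutive gaps, the closed form g n = g 0 + n * (g 1 - g 0)
theorem pv_closed (g : Int → Int) (L : Int)
    (hA : ∀ i : Int, 2 ≤ i → i < L → g i - g (i - 1) = g 1 - g 0) :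
    ∀ n : Nat, (n : Int) < L → g n = g 0 + n * (g 1 - g 0) := by
  intro n
  induction n with
  | zero => intro _; norm_num
  | succ m ih =>
    intro h
    by_cases hm : m = 0
    · subst hm; norm_num
    · have h1 := hA (m + 1) (by omega) (by push_cast at h ⊢; omega)
      have h2 := ih (by push_cast at h ⊢; omega)
      have e : (m : Int) + 1 - 1 = m := by omega
      rw [e] at h1
      push_cast
      ring_nf
      ring_nf at h1 h2
      omega

-- equivalence: all gaps equal the first gap ↔ the closed form holds everywhere
theorem pv_arith_iff (g : Int → Int) (L : Int) (hL : 3 ≤ L) :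
    (∀ i : Int, 2 ≤ i → i < L → g i - g (i - 1) = g 1 - g 0) ↔
    (∀ i : Int, 0 ≤ i → i < L → g i = g 0 + i * (g 1 - g 0)) := by
  constructor
  · intro hA i h0 h2
    have := pv_closed g L hA i.toNat (by omega)
    have e : ((i.toNat : Int)) = i := by omega
    rw [e] at this
    exact this
  · intro hB i h1 h2
    have ha := hB i (by omega) (by omega)
    have hb := hB (i - 1) (by omega) (by omega)
    have hc := hB 1 (by omega) (by omega)
    nlinarith [ha, hb, hc]

theorem is_equal_diff_spec : Claim_equal_is_equal_diff := by
  intro number _ _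
  unfold Spec_is_equal_diff is_equal_diff is_equal_diff_alt
  set ds := pvDigits number with hds
  by_cases h : (ds.length : Int) > 2
  · simp only [h, if_pos, if_neg (by omega : ¬ (ds.length : Int) < 3)]
    rw [PySem.List.foldl_ite_false_eq]
    rw [Bool.true_and, Bool.eq_iff_iff]
    have key := pv_arith_iff (fun i => PySem.List.pyGetD ds i 0) (ds.length : Int) (by omega)
    simp only at key
    -- A side to the gap condition
    simp only [Bool.not_eq_true', List.any_eq_false, PySem.List.mem_pyRange_one,
      decide_eq_true_eq, not_not, and_imp]
    -- B side: list equality to pointwise closed form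
    have hBiff : (ds == (PySem.List.pyRange 0 (ds.length : Int) 1).map
        (fun k => PySem.List.pyGetD ds 0 0 + k * (PySem.List.pyGetD ds 1 0 - PySem.List.pyGetD ds 0 0))) = true ↔
        (∀ i : Int, 0 ≤ i → i < (ds.length : Int) →
          PySem.List.pyGetD ds i 0 = PySem.List.pyGetD ds 0 0 + i * (PySem.List.pyGetD ds 1 0 - PySem.List.pyGetD ds 0 0)) := by
      rw [beq_iff_eq]
      constructor
      · intro he i h0 h2
        have hk : i.toNat < ds.length := by omega
        have := congrArg (fun l => l[i.toNat]?) he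
        simp only at this
        rw [List.getElem?_eq_getElem hk] at this
        have hk2 : i.toNat < ((PySem.List.pyRange 0 (ds.length : Int) 1).map
            (fun k => PySem.List.pyGetD ds 0 0 + k * (PySem.List.pyGetD ds 1 0 - PySem.List.pyGetD ds 0 0))).length := by
          rw [List.length_map, PySem.List.length_pyRange_one]; omega
        rw [List.getElem?_eq_getElem hk2] at this
        have := Option.some.inj this
        rw [List.getElem_map, PySem.List.getElem_pyRange_one] at this
        rw [PySem.List.pyGetD_eq_getElem ds 0 h0 (by omega)]
        rw [this, show ((0:Int) + (i.toNat:Int)) = i by omega]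
      · intro hp
        apply List.ext_getElem
        · rw [List.length_map, PySem.List.length_pyRange_one]; omega
        · intro k hk hk2
          rw [List.getElem_map, PySem.List.getElem_pyRange_one]
          have := hp k (by omega) (by omega)
          rw [PySem.List.pyGetD_eq_getElem ds 0 (by omega : (0:Int) ≤ (k:Int)) (by omega)] at this
          simp only [Int.toNat_natCast] at this
          rw [this]
          norm_num
    rw [hBiff]
    exact key
  · simp [h, show (ds.length : Int) < 3 by omega]
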